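-- pv_equiv track=rewrite | github.com/bkrshubham95/AI | sbipink-a2-master/part2/quintris.py | cost_params
-- ===== SOURCE A (Python) =====
-- import copy
--
-- def cost_params(board):
--     new_board = copy.deepcopy(board)
--     new_board.append('x'*len(new_board[0]))
--
--     # compute holes
--     b_holes = [''.join(s) for s in zip(*new_board)]
--     for i in range(len(b_holes)):
--         b_holes[i] = b_holes[i].strip()
--     holes = sum(s.count(' ') for s in b_holes)
--
--     # compute max_height
--     b_max_height = [''.join(s) for s in zip(*new_board)]
--     for i in range(len(b_max_height)):
--         b_max_height[i] = b_max_height[i].lstrip()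
--     max_height = max(len(s) for s in b_max_height)
--
--     # compute min_height
--     b_min_height = [''.join(s) for s in zip(*new_board)]
--     for i in range(len(b_min_height)):
--         b_min_height[i] = b_min_height[i].lstrip()
--     min_height = min(len(s) for s in b_min_height)
--
--     # compute empty_space
--     b_empty_space = [''.join(s) for s in zip(*new_board)]
--     for i in range(len(b_empty_space)):
--         b_empty_space[i] = b_empty_space[i].lstrip()
--     empty_space = sum((max(len(s) for s in b_empty_space)-s.count('x'))
--                       for s in b_empty_space)
--
--     # compute wells
--     b_wells = [''.join(s) for s in zip(*new_board)]
--     wells = 0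
--     for r in range(len(b_wells)-1):
--         for c in range(len(b_wells[0])):
--             if b_wells[r][c] != b_wells[r+1][c] and b_wells[r][c] == ' ':
--                 wells += 1
--     for r in range(len(b_wells)-2):
--         for c in range(len(b_wells[0])):
--             if b_wells[r][c] == b_wells[r+1][c] and b_wells[r][c] != b_wells[r+2][c] and b_wells[r][c] == ' ':
--                 wells += 2
--     for c in range(len(b_wells[-1])):
--         if b_wells[-1][c] != b_wells[-2][c] and b_wells[-1][c] == ' ':
--             wells += 1
--
--     # compute number of blocks
--     blocks = sum(s.count('x') for s in board)
--     return holes, max_height-min_height, empty_space, wells, blocks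
-- ===== SOURCE B (Python) =====
-- def _colstep(st, ch):
--     # one column's accumulator: (seen a non-whitespace char, leading-whitespace count,
--     # holes = spaces below the first block, number of 'x' chars)
--     seen, lead, holes, xs = st
--     if seen:
--         if ch == ' ':
--             holes += 1
--     elif ch.isspace():
--         lead += 1
--     else:
--         seen = True
--     if ch == 'x':
--         xs += 1
--     return (seen, lead, holes, xs)
--
--
-- def cost_params(board):
--     # row-major single pass: never builds the transpose; per-column accumulators are
--     # updated row by row, and the wells tests are done inside the same row scan
--     # (A's cols[r][c] vs cols[r+1][c] comparisons are adjacent cells of one board row).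
--     W = min(len(s) for s in board)
--     rows = board + ['x' * len(board[0])]
--     H = len(rows)
--     st = [(False, 0, 0, 0)] * W
--     wells = 0
--     for row in rows:
--         st = [_colstep(s, ch) for s, ch in zip(st, row)]
--         for c in range(W - 1):
--             if row[c] == ' ' and row[c + 1] != ' ':
--                 wells += 1
--         for c in range(W - 2):
--             if row[c] == ' ' and row[c + 1] == ' ' and row[c + 2] != ' ':
--                 wells += 2
--         a, b = row[W - 2:W]
--         if b == ' ' and a != ' ':
--             wells += 1
--     holes = sum(s[2] for s in st)
--     total_x = sum(s[3] for s in st)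
--     max_h = H - min(s[1] for s in st)
--     min_h = H - max(s[1] for s in st)
--     empty_space = W * max_h - total_x
--     blocks = sum(s.count('x') for s in board)
--     return holes, max_h - min_h, empty_space, wells, blocks
-- ===== Notes on version B (the rewrite author's own statement) =====
-- stated objective: alternative
-- what changed: B never builds the transpose: it scans the board row by row in one pass, updating per-column accumulators (seen-block flag, leading-whitespace count, holes, x-count) and evaluating the wells comparisons inside the same row scan (A's cols[r][c] vs cols[r+1][c] tests are adjacent cells of one board row), where A deep-copies the board, rebuilds the column transpose five times and rescans it once per statistic.
import Mathlib
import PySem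

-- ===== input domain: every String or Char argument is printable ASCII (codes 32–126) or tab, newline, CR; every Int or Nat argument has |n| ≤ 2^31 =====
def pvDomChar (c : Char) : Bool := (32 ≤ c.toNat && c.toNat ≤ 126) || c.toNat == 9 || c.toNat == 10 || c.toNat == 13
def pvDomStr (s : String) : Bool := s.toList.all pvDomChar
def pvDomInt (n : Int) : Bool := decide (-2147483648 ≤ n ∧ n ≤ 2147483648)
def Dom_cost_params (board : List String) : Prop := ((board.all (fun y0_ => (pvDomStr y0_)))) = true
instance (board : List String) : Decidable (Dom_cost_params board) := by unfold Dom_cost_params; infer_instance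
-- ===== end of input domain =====

-- B replaces A's five transpose-and-rescan passes by a single row-major sweep (per-column
-- accumulators updated row by row, wells tested inside the same row scan); objective: alternative.


-- ===== PORT A =====
-- hand port of Python's  [''.join(s) for s in zip(*rows)] : exact zip semantics —
-- truncation to the shortest row; the getD default is never read since j < every row length.
def pyZipStar (rows : List (List Char)) : List (List Char) :=
  match rows with
  | [] => []
  | r0 :: rest =>
    let n := rest.foldl (fun m r => min m r.length) r0.length
    (List.range n).map (fun j => (r0 :: rest).map (fun r => r.getD j ' '))

-- Python's max(len(s) for s in l) / min(...): the [] branch is the ValueError case, outside Pre_.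
def pyMaxLen (l : List (List Char)) : Int :=
  match l with
  | [] => 0
  | s0 :: rest => rest.foldl (fun m s => max m ((s.length : Int))) ((s0.length : Int))

def pyMinLen (l : List (List Char)) : Int :=
  match l with
  | [] => 0
  | s0 :: rest => rest.foldl (fun m s => min m ((s.length : Int))) ((s0.length : Int))

-- A's three wells scans over the column list (cols[-1]/cols[-2] read with getD: the
-- out-of-range case is Python's IndexError, outside Pre_)
def wellsOf (cols : List (List Char)) : Int :=
  let colAt : Nat → Nat → Char := fun r c => (cols.getD r []).getD c ' '
  let w1 := (List.range (cols.length - 1)).foldl (fun w r =>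
    (List.range (cols.headD []).length).foldl (fun w c =>
      if colAt r c ≠ colAt (r+1) c ∧ colAt r c = ' ' then w + 1 else w) w) (0 : Int)
  let w2 := (List.range (cols.length - 2)).foldl (fun w r =>
    (List.range (cols.headD []).length).foldl (fun w c =>
      if colAt r c = colAt (r+1) c ∧ colAt r c ≠ colAt (r+2) c ∧ colAt r c = ' ' then w + 2 else w) w) w1
  (List.range (cols.getD (cols.length - 1) []).length).foldl (fun w c =>
    if colAt (cols.length - 1) c ≠ colAt (cols.length - 2) c ∧ colAt (cols.length - 1) c = ' '
    then w + 1 else w) w2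

-- blocks = sum(s.count('x') for s in board), an identical line in both Python sources
def blocksOf (board : List String) : Int :=
  board.foldl (fun a s => a + ((PySem.Chars.count s.toList ['x'] : Int))) 0

def cost_params (board : List String) : Int × Int × Int × Int × Int :=
  match board with
  | [] => (0, 0, 0, 0, 0)   -- board[0] raises IndexError in Python; outside Pre_
  | b0 :: _ =>
    let rows := board.map (·.toList) ++ [List.replicate b0.toList.length 'x']
    let bHoles := (pyZipStar rows).map PySem.Chars.strip
    let holes : Int := bHoles.foldl (fun a s => a + ((PySem.Chars.count s [' '] : Int))) 0
    let bMax := (pyZipStar rows).map PySem.Chars.lstrip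
    let maxHeight : Int := pyMaxLen bMax
    let bMin := (pyZipStar rows).map PySem.Chars.lstrip
    let minHeight : Int := pyMinLen bMin
    let bEmpty := (pyZipStar rows).map PySem.Chars.lstrip
    let emptySpace : Int :=
      bEmpty.foldl (fun a s => a + (pyMaxLen bEmpty - ((PySem.Chars.count s ['x'] : Int)))) 0
    (holes, maxHeight - minHeight, emptySpace, wellsOf (pyZipStar rows), blocksOf board)

-- ===== PORT B =====
-- one column's accumulator (seen, lead, holes, xs), updated with one character of a row
def colstep : (Bool × Int × Int × Int) → Char → (Bool × Int × Int × Int)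
  | (seen, lead, holes, xs), ch =>
    let xs' := if ch = 'x' then xs + 1 else xs
    if seen then (seen, lead, (if ch = ' ' then holes + 1 else holes), xs')
    else if PySem.Chars.isspace ch then (seen, lead + 1, holes, xs')
    else (true, lead, holes, xs')

-- one iteration of B's row loop: zip the per-column states with the row, then the three
-- in-row wells tests (loop indices are < W ≤ len(row) inside Pre_, so getD is exact; the
-- 'a, b = row[W-2:W]' unpacking is exact inside Pre_, where the slice has length 2)
def rowStep (W : Nat) (acc : List (Bool × Int × Int × Int) × Int) (row : List Char) :
    List (Bool × Int × Int × Int) × Int :=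
  let st := List.zipWith colstep acc.1 row
  let w1 := (List.range (W - 1)).foldl (fun w c =>
    if row.getD c ' ' = ' ' ∧ row.getD (c+1) ' ' ≠ ' ' then w + 1 else w) acc.2
  let w2 := (List.range (W - 2)).foldl (fun w c =>
    if row.getD c ' ' = ' ' ∧ row.getD (c+1) ' ' = ' ' ∧ row.getD (c+2) ' ' ≠ ' '
    then w + 2 else w) w1
  let t := PySem.List.slice row (some ((W : Int) - 2)) (some (W : Int))
  (st, if t.getD 1 ' ' = ' ' ∧ t.getD 0 ' ' ≠ ' ' then w2 + 1 else w2)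

-- sum(s[2] for s in st) / sum(s[3] for s in st)
def sumHoles (st : List (Bool × Int × Int × Int)) : Int := st.foldl (fun a s => a + s.2.2.1) 0
def sumXs (st : List (Bool × Int × Int × Int)) : Int := st.foldl (fun a s => a + s.2.2.2) 0
-- min/max(s[1] for s in st); [] is Python's ValueError case, outside Pre_
def minLead (st : List (Bool × Int × Int × Int)) : Int :=
  match st with | [] => 0 | s :: r => r.foldl (fun m t => min m t.2.1) s.2.1
def maxLead (st : List (Bool × Int × Int × Int)) : Int :=
  match st with | [] => 0 | s :: r => r.foldl (fun m t => max m t.2.1) s.2.1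

def cost_params_alt (board : List String) : Int × Int × Int × Int × Int :=
  match board with
  | [] => (0, 0, 0, 0, 0)   -- min() over an empty generator raises ValueError; outside Pre_
  | b0 :: rest =>
    let W : Nat := rest.foldl (fun m s => min m s.toList.length) b0.toList.length
    let rows := board.map (·.toList) ++ [List.replicate b0.toList.length 'x']
    let H : Int := (rows.length : Int)
    let fin := rows.foldl (rowStep W) (List.replicate W (false, 0, 0, 0), 0)
    let max_h : Int := H - minLead fin.1
    let min_h : Int := H - maxLead fin.1
    let empty_space : Int := (W : Int) * max_h - sumXs fin.1
    (sumHoles fin.1, max_h - min_h, empty_space, fin.2, blocksOf board)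

-- ===== PRECONDITION & SPEC =====
-- Pre_ excludes exactly the inputs where Python A raises: the empty board (IndexError at
-- board[0]) and boards whose shortest row has fewer than 2 characters (an empty transpose
-- → ValueError from max() on an empty generator; a single column → IndexError at b_wells[-2]).
def Pre_cost_params (board : List String) : Prop :=
  board ≠ [] ∧ ∀ s ∈ board, 2 ≤ s.toList.length
instance (board : List String) : Decidable (Pre_cost_params board) := by
  unfold Pre_cost_params; infer_instance

def pvWitness_cost_params : List String := ["x ", " x", "  "]

def Spec_cost_params (board : List String) (out : Int × Int × Int × Int × Int) : Prop :=
  out = cost_params_alt board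
instance (board : List String) (out : Int × Int × Int × Int × Int) :
    Decidable (Spec_cost_params board out) := by unfold Spec_cost_params; infer_instance

-- ===== CLAIM (what is proved, stated in full; the proofs are below) =====
def Claim_equal_cost_params : Prop :=
  ∀ (board : List String), Dom_cost_params board → Pre_cost_params board →
    Spec_cost_params board (cost_params board)

-- ===== LEMMAS AND PROOFS =====

-- Chars.count with a one-character needle is List.count
theorem count_go_singleton (c : Char) (l : List Char) : ∀ (fuel : Nat) (acc : Nat),
    l.length ≤ fuel → PySem.Chars.count.go [c] fuel l acc = acc + l.count c := by
  induction l with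
  | nil => intro fuel acc _; cases fuel <;> simp [PySem.Chars.count.go]
  | cons h t ih =>
    intro fuel acc hf
    cases fuel with
    | zero => simp at hf
    | succ f =>
      by_cases hc : h = c
      · subst hc
        simp [PySem.Chars.count.go, List.isPrefixOf, ih f (acc + 1) (by simpa using hf),
          List.count_cons]
        omega
      · simp [PySem.Chars.count.go, List.isPrefixOf, hc, Ne.symm hc,
          ih f acc (by simpa using hf), List.count_cons]

theorem count_singleton (l : List Char) (c : Char) :
    (PySem.Chars.count l [c] : Int) = (l.count c : Int) := by
  simp [PySem.Chars.count, count_go_singleton c l l.length 0 le_rfl]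

-- the per-column fold, characterised
theorem colstep_true (l : List Char) : ∀ (lead h x : Int),
    l.foldl colstep (true, lead, h, x) = (true, lead, h + l.count ' ', x + l.count 'x') := by
  induction l with
  | nil => intro lead h x; simp
  | cons ch t ih =>
    intro lead h x
    rw [List.foldl_cons, show colstep (true, lead, h, x) ch =
      (true, lead, (if ch = ' ' then h + 1 else h), (if ch = 'x' then x + 1 else x)) from rfl, ih]
    by_cases h1 : ch = ' '
    · subst h1; simp [Prod.mk.injEq, List.count_cons]; push_cast; omega
    · by_cases h2 : ch = 'x'
      · subst h2; simp [Prod.mk.injEq, List.count_cons, h1]; push_cast; omega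
      · simp [Prod.mk.injEq, List.count_cons, h1, h2]

theorem colstep_false (l : List Char) : ∀ (lead x : Int),
    l.foldl colstep (false, lead, 0, x) =
      (!(l.all PySem.Chars.isspace),
       lead + ((l.takeWhile PySem.Chars.isspace).length : Int),
       ((l.dropWhile PySem.Chars.isspace).count ' ' : Int),
       x + l.count 'x') := by
  induction l with
  | nil => intro lead x; simp
  | cons ch t ih =>
    intro lead x
    by_cases hs : PySem.Chars.isspace ch = true
    · have hx : ch ≠ 'x' := by rintro rfl; simp [PySem.Chars.isspace] at hs
      rw [List.foldl_cons, show colstep (false, lead, 0, x) ch =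
        (false, lead + 1, 0, x) by simp [colstep, hs, hx], ih]
      have h1 : List.takeWhile PySem.Chars.isspace (ch :: t) =
          ch :: List.takeWhile PySem.Chars.isspace t := List.takeWhile_cons_of_pos hs
      have h2 : List.dropWhile PySem.Chars.isspace (ch :: t) =
          List.dropWhile PySem.Chars.isspace t := List.dropWhile_cons_of_pos hs
      simp [Prod.mk.injEq, h1, h2, hs, hx, List.count_cons]
      push_cast; omega
    · have hsp : ch ≠ ' ' := by rintro rfl; simp [PySem.Chars.isspace] at hs
      rw [List.foldl_cons, show colstep (false, lead, 0, x) ch =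
        (true, lead, 0, (if ch = 'x' then x + 1 else x)) by simp [colstep, hs], colstep_true]
      have h1 : List.takeWhile PySem.Chars.isspace (ch :: t) = [] :=
        List.takeWhile_cons_of_neg (by simpa using hs)
      have h2 : List.dropWhile PySem.Chars.isspace (ch :: t) = ch :: t :=
        List.dropWhile_cons_of_neg (by simpa using hs)
      simp [Prod.mk.injEq, h1, h2, hs, hsp, List.count_cons]
      by_cases hx : ch = 'x' <;> simp [hx] <;> push_cast <;> omega

-- zipWith-fold over the rows = per-column fold over the transposed entries
theorem zfold_length (rows : List (List Char)) : ∀ (st : List (Bool × Int × Int × Int)),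
    (∀ r ∈ rows, st.length ≤ r.length) →
    (rows.foldl (fun s r => List.zipWith colstep s r) st).length = st.length := by
  induction rows with
  | nil => intro st _; rfl
  | cons r rs ih =>
    intro st h
    have h1 : st.length ≤ r.length := h r (by simp)
    have h2 : (List.zipWith colstep st r).length = st.length := by
      simp [List.length_zipWith]; omega
    rw [List.foldl_cons, ih _ (by intro q hq; rw [h2]; exact h q (by simp [hq])), h2]

theorem zfold_getD (rows : List (List Char)) : ∀ (st : List (Bool × Int × Int × Int))
    (c : Nat), (∀ r ∈ rows, st.length ≤ r.length) → c < st.length →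
    (rows.foldl (fun s r => List.zipWith colstep s r) st).getD c (false, 0, 0, 0) =
      (rows.map (fun r => r.getD c ' ')).foldl colstep (st.getD c (false, 0, 0, 0)) := by
  induction rows with
  | nil => intro st c _ _; rfl
  | cons r rs ih =>
    intro st c h hc
    have h1 : st.length ≤ r.length := h r (by simp)
    have h2 : (List.zipWith colstep st r).length = st.length := by
      simp [List.length_zipWith]; omega
    rw [List.foldl_cons, List.map_cons, List.foldl_cons,
      ih _ c (by intro q hq; rw [h2]; exact h q (by simp [hq])) (by omega)]
    congr 1
    have hcr : c < r.length := by omega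
    rw [List.getD_eq_getElem _ _ (by omega), List.getD_eq_getElem _ _ hc,
      List.getD_eq_getElem _ _ hcr, List.getElem_zipWith]

-- B's row fold, split into its two independent components
theorem bfold_fst (W : Nat) (rows : List (List Char)) :
    ∀ (st : List (Bool × Int × Int × Int)) (w : Int),
    (rows.foldl (rowStep W) (st, w)).1 = rows.foldl (fun s r => List.zipWith colstep s r) st := by
  induction rows with
  | nil => intro st w; rfl
  | cons r rs ih => intro st w; rw [List.foldl_cons, List.foldl_cons]; exact ih _ _

-- fold over range with a conditional bump = a Finset sum
theorem foldl_range_ite (n : Nat) (P : Nat → Prop) [DecidablePred P] (k : Int) :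
    ∀ (a : Int), (List.range n).foldl (fun w i => if P i then w + k else w) a =
      a + ∑ i ∈ Finset.range n, (if P i then k else 0) := by
  induction n with
  | zero => intro a; simp
  | succ m ih =>
    intro a
    rw [List.range_succ, List.foldl_append, ih, Finset.sum_range_succ]
    by_cases h : P m <;> simp [h] <;> ring

-- the wells contribution of one row (proof-side closed form)
def wrow (W : Nat) (row : List Char) : Int :=
  (∑ c ∈ Finset.range (W - 1),
    (if row.getD c ' ' = ' ' ∧ row.getD (c+1) ' ' ≠ ' ' then (1 : Int) else 0))
  + (∑ c ∈ Finset.range (W - 2),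
    (if row.getD c ' ' = ' ' ∧ row.getD (c+1) ' ' = ' ' ∧ row.getD (c+2) ' ' ≠ ' '
     then (2 : Int) else 0))
  + (if row.getD (W - 1) ' ' = ' ' ∧ row.getD (W - 2) ' ' ≠ ' ' then (1 : Int) else 0)

theorem slice_last_two (r : List Char) (k : Nat) (hlen : k + 2 ≤ r.length) :
    PySem.List.slice r (some ((((k:Nat) + 2 : Nat) : Int) - 2)) (some (((k:Nat) + 2 : Nat) : Int)) =
      [r.getD k ' ', r.getD (k+1) ' '] := by
  rw [show ((((k:Nat) + 2 : Nat) : Int) - 2) = ((k : Nat) : Int) by push_cast; ring,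
    PySem.List.slice_natCast]
  have h1 : k < r.length := by omega
  have h2 : k + 1 < r.length := by omega
  have hd : 2 ≤ (r.drop k).length := by simp; omega
  rw [List.getD_eq_getElem _ _ h1, List.getD_eq_getElem _ _ h2]
  apply List.ext_getElem
  · simp; omega
  · intro i hi1 hi2
    simp only [List.length_take, List.length_drop] at hi1
    have : i < 2 := by omega
    interval_cases i <;>
      simp [List.getElem_take, List.getElem_drop]

theorem bfold_snd (W : Nat) (rows : List (List Char)) (h2 : 2 ≤ W)
    (hlen : ∀ r ∈ rows, W ≤ r.length) :
    ∀ (st : List (Bool × Int × Int × Int)) (w : Int),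
    (rows.foldl (rowStep W) (st, w)).2 = w + (rows.map (wrow W)).sum := by
  induction rows with
  | nil => intro st w; simp
  | cons r rs ih =>
    intro st w
    rw [List.foldl_cons, List.map_cons, List.sum_cons,
      ih (fun q hq => hlen q (by simp [hq]))]
    have hsl : PySem.List.slice r (some ((W : Int) - 2)) (some (W : Int)) =
        [r.getD (W-2) ' ', r.getD (W-1) ' '] := by
      obtain ⟨k, rfl⟩ : ∃ k, W = k + 2 := ⟨W - 2, by omega⟩
      have := slice_last_two r k (by simpa using hlen r (by simp))
      simpa [show k + 2 - 2 = k by omega, show k + 2 - 1 = k + 1 by omega] using this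
    have : (rowStep W (st, w) r).2 = w + wrow W r := by
      simp only [rowStep, wrow, foldl_range_ite, hsl, List.getD_cons_zero,
        List.getD_cons_succ]
      split_ifs with h <;> ring
    rw [this]; ring

-- sum over a mapped list as a Finset.range sum
theorem sum_map_eq_range_sum {α : Type} (l : List α) (f : α → Int) (d : α) :
    (l.map f).sum = ∑ i ∈ Finset.range l.length, f (l.getD i d) := by
  induction l with
  | nil => simp
  | cons x xs ih =>
    rw [List.map_cons, List.sum_cons, ih, List.length_cons, Finset.sum_range_succ']
    simp only [List.getD_cons_zero, List.getD_cons_succ]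
    ring

-- Σ (C - g x) = length·C - Σ g x
theorem sum_map_const_sub_int {α : Type} (l : List α) (C : Int) (g : α → Int) :
    (l.map (fun x => C - g x)).sum = (l.length : Int) * C - (l.map g).sum := by
  induction l with
  | nil => simp
  | cons x xs ih => simp [ih]; ring

-- max over (H - g) is H - min over g (head-seeded folds)
theorem fold_max_sub {α : Type} (l : List α) (g : α → Int) (H : Int) : ∀ (a : Int),
    l.foldl (fun m x => max m (H - g x)) (H - a) = H - l.foldl (fun m x => min m (g x)) a := by
  induction l with
  | nil => intro a; rfl
  | cons x xs ih =>
    intro a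
    rw [List.foldl_cons, List.foldl_cons, show max (H - a) (H - g x) = H - min a (g x) by omega, ih]

theorem fold_min_sub {α : Type} (l : List α) (g : α → Int) (H : Int) : ∀ (a : Int),
    l.foldl (fun m x => min m (H - g x)) (H - a) = H - l.foldl (fun m x => max m (g x)) a := by
  induction l with
  | nil => intro a; rfl
  | cons x xs ih =>
    intro a
    rw [List.foldl_cons, List.foldl_cons, show min (H - a) (H - g x) = H - max a (g x) by omega, ih]

-- bounds for the head-seeded min fold
theorem foldl_min_le_init {α : Type} (l : List α) (g : α → Nat) : ∀ (a : Nat),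
    l.foldl (fun m x => min m (g x)) a ≤ a := by
  induction l with
  | nil => intro a; exact le_rfl
  | cons x xs ih => intro a; exact le_trans (ih _) (min_le_left _ _)

theorem foldl_min_le_mem {α : Type} (l : List α) (g : α → Nat) : ∀ (a : Nat) (x : α), x ∈ l →
    l.foldl (fun m x => min m (g x)) a ≤ g x := by
  induction l with
  | nil => intro a x hx; simp at hx
  | cons y ys ih =>
    intro a x hx
    rw [List.foldl_cons]
    rcases List.mem_cons.1 hx with rfl | hx
    · exact le_trans (foldl_min_le_init _ _ _) (min_le_right _ _)
    · exact ih _ _ hx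

theorem le_foldl_min {α : Type} (l : List α) (g : α → Nat) (k : Nat) : ∀ (a : Nat),
    k ≤ a → (∀ x ∈ l, k ≤ g x) → k ≤ l.foldl (fun m x => min m (g x)) a := by
  induction l with
  | nil => intro a ha _; exact ha
  | cons y ys ih =>
    intro a ha h
    exact ih _ (le_min ha (h y (by simp))) (fun x hx => h x (by simp [hx]))

-- rstrip is the identity on a list ending in 'x'
theorem rstrip_append_x (cs : List Char) :
    PySem.Chars.rstrip (cs ++ ['x']) = cs ++ ['x'] := by
  have hx : PySem.Chars.isspace 'x' = false := by decide
  simp [PySem.Chars.rstrip, List.dropWhile, hx]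

theorem strip_append_x (cs : List Char) :
    PySem.Chars.strip (cs ++ ['x']) = PySem.Chars.lstrip (cs ++ ['x']) := by
  unfold PySem.Chars.strip PySem.Chars.lstrip
  rw [List.dropWhile_append]
  have hx : PySem.Chars.isspace 'x' = false := by decide
  by_cases h : (List.dropWhile PySem.Chars.isspace cs).isEmpty
  · simp [h, List.dropWhile, PySem.Chars.rstrip, hx]
  · simp only [h, Bool.false_eq_true, if_false]
    exact rstrip_append_x _

-- no 'x' is dropped by lstrip
theorem count_x_lstrip (l : List Char) :
    ((PySem.Chars.lstrip l).count 'x' : Int) = (l.count 'x' : Int) := by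
  unfold PySem.Chars.lstrip
  congr 1
  conv_rhs => rw [← List.takeWhile_append_dropWhile (p := PySem.Chars.isspace) (l := l)]
  rw [List.count_append]
  have : (l.takeWhile PySem.Chars.isspace).count 'x' = 0 := by
    rw [List.count_eq_zero]
    intro h
    have := List.mem_takeWhile_imp h
    simp [PySem.Chars.isspace] at this
  omega

-- length of dropWhile
theorem length_dropWhile_eq (l : List Char) (p : Char → Bool) :
    (l.dropWhile p).length = l.length - (l.takeWhile p).length := by
  have h := congrArg List.length (List.takeWhile_append_dropWhile (p := p) (l := l))
  simp only [List.length_append] at h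
  omega

-- reading entry r of mapped column c both ways (defaults agree, so no bound is needed)
theorem getD_map_swap (rows : List (List Char)) (r c : Nat) :
    (rows.map (fun rr => rr.getD r ' ')).getD c ' ' = (rows.getD c []).getD r ' ' := by
  rcases h : rows[c]? with _ | rr <;>
    simp [List.getD, List.getElem?_map, h]

theorem getD_range_map {β : Type} (f : Nat → β) (d : β) (n r : Nat) (h : r < n) :
    ((List.range n).map f).getD r d = f r := by
  rw [List.getD_eq_getElem _ _ (by simpa using h)]
  simp

theorem cond1_iff (a b : Char) : (a ≠ b ∧ a = ' ') ↔ (a = ' ' ∧ b ≠ ' ') := by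
  constructor
  · rintro ⟨h1, rfl⟩; exact ⟨rfl, fun h => h1 h.symm⟩
  · rintro ⟨rfl, h2⟩; exact ⟨fun h => h2 h.symm, rfl⟩

theorem cond2_iff (a b c : Char) : (a = b ∧ a ≠ c ∧ a = ' ') ↔ (a = ' ' ∧ b = ' ' ∧ c ≠ ' ') := by
  constructor
  · rintro ⟨h1, h2, rfl⟩; exact ⟨rfl, h1.symm, fun h => h2 h.symm⟩
  · rintro ⟨rfl, h2, h3⟩; exact ⟨h2.symm, fun h => h3 h.symm, rfl⟩

-- a nested counted double loop = a double Finset sum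
theorem foldl_foldl_ite (n m : Nat) (P : Nat → Nat → Prop) [inst : ∀ r c, Decidable (P r c)]
    (kk : Int) : ∀ (a : Int),
    (List.range n).foldl
      (fun w r => (List.range m).foldl (fun w c => if P r c then w + kk else w) w) a
      = a + ∑ r ∈ Finset.range n, ∑ c ∈ Finset.range m, (if P r c then kk else 0) := by
  induction n with
  | zero => intro a; simp
  | succ q ih =>
    intro a
    rw [List.range_succ, List.foldl_append, ih, Finset.sum_range_succ]
    simp only [List.foldl_cons, List.foldl_nil]
    rw [foldl_range_ite]
    ring

-- the transpose as a range-map of column readers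
theorem zip_eq_range_map (r0 : List Char) (rs : List (List Char)) (Wn : Nat)
    (hW : (rs.foldl (fun m r => min m r.length) r0.length) = Wn) :
    pyZipStar (r0 :: rs) =
      (List.range Wn).map (fun c => (r0 :: rs).map (fun rr => rr.getD c ' ')) := by
  simp only [pyZipStar, hW]

-- A's wells block = the row-indexed sum of B's per-row contributions
theorem wellsA_eq (rows : List (List Char)) (Wn : Nat) (h2 : 2 ≤ Wn) :
    wellsOf ((List.range Wn).map (fun c => rows.map (fun rr => rr.getD c ' '))) =
      ∑ i ∈ Finset.range rows.length, wrow Wn (rows.getD i []) := by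
  obtain ⟨k, rfl⟩ : ∃ k, Wn = k + 2 := ⟨Wn - 2, by omega⟩
  set F : Nat → List Char := fun c => rows.map (fun rr => rr.getD c ' ') with hF
  have hlenM : ((List.range (k+2)).map F).length = k + 2 := by simp
  have hhead : ((List.range (k+2)).map F).headD [] = F 0 := by
    rw [List.range_succ_eq_map]; rfl
  have hlenF : ∀ c, (F c).length = rows.length := by intro c; simp [hF]
  have hgetM : ∀ r < k + 2, ((List.range (k+2)).map F).getD r [] = F r := by
    intro r hr; exact getD_range_map F [] _ r hr
  simp only [wellsOf, hlenM, hhead, hlenF]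
  rw [show k + 2 - 1 = k + 1 by omega, show k + 2 - 2 = k by omega,
    hgetM (k+1) (by omega), hgetM k (by omega), hlenF,
    foldl_foldl_ite, foldl_foldl_ite, foldl_range_ite]
  have e1 : (∑ r ∈ Finset.range (k + 1), ∑ c ∈ Finset.range rows.length,
        (if ((List.map F (List.range (k + 2))).getD r []).getD c ' ' ≠
              ((List.map F (List.range (k + 2))).getD (r + 1) []).getD c ' ' ∧
            ((List.map F (List.range (k + 2))).getD r []).getD c ' ' = ' '
         then (1 : Int) else 0)) =
      ∑ c ∈ Finset.range rows.length, ∑ r ∈ Finset.range (k + 1),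
        (if (rows.getD c []).getD r ' ' = ' ' ∧ (rows.getD c []).getD (r+1) ' ' ≠ ' '
         then (1 : Int) else 0) := by
    rw [Finset.sum_comm]
    refine Finset.sum_congr rfl (fun c _ => Finset.sum_congr rfl (fun r hr => ?_))
    have hr' := Finset.mem_range.mp hr
    rw [hgetM r (by omega), hgetM (r+1) (by omega)]
    simp only [hF, getD_map_swap]
    exact if_congr (cond1_iff _ _) rfl rfl
  have e2 : (∑ r ∈ Finset.range k, ∑ c ∈ Finset.range rows.length,
        (if ((List.map F (List.range (k + 2))).getD r []).getD c ' ' =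
              ((List.map F (List.range (k + 2))).getD (r + 1) []).getD c ' ' ∧
            ((List.map F (List.range (k + 2))).getD r []).getD c ' ' ≠
              ((List.map F (List.range (k + 2))).getD (r + 2) []).getD c ' ' ∧
            ((List.map F (List.range (k + 2))).getD r []).getD c ' ' = ' '
         then (2 : Int) else 0)) =
      ∑ c ∈ Finset.range rows.length, ∑ r ∈ Finset.range k,
        (if (rows.getD c []).getD r ' ' = ' ' ∧ (rows.getD c []).getD (r+1) ' ' = ' ' ∧
            (rows.getD c []).getD (r+2) ' ' ≠ ' '
         then (2 : Int) else 0) := by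
    rw [Finset.sum_comm]
    refine Finset.sum_congr rfl (fun c _ => Finset.sum_congr rfl (fun r hr => ?_))
    have hr' := Finset.mem_range.mp hr
    rw [hgetM r (by omega), hgetM (r+1) (by omega), hgetM (r+2) (by omega)]
    simp only [hF, getD_map_swap]
    exact if_congr (cond2_iff _ _ _) rfl rfl
  have e3 : (∑ i ∈ Finset.range rows.length,
        (if (F (k + 1)).getD i ' ' ≠ (F k).getD i ' ' ∧ (F (k + 1)).getD i ' ' = ' '
         then (1 : Int) else 0)) =
      ∑ i ∈ Finset.range rows.length,
        (if (rows.getD i []).getD (k+1) ' ' = ' ' ∧ (rows.getD i []).getD k ' ' ≠ ' '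
         then (1 : Int) else 0) := by
    refine Finset.sum_congr rfl (fun i _ => ?_)
    simp only [hF, getD_map_swap]
    exact if_congr (cond1_iff _ _) rfl rfl
  rw [e1, e2, e3]
  simp only [wrow, show k + 2 - 1 = k + 1 by omega, show k + 2 - 2 = k by omega,
    Finset.sum_add_distrib]
  ring

theorem main_eq (b0 : String) (rest : List String)
    (hlen : ∀ s ∈ b0 :: rest, 2 ≤ s.toList.length) :
    cost_params (b0 :: rest) = cost_params_alt (b0 :: rest) := by
  have h2W : 2 ≤ rest.foldl (fun m s => min m s.toList.length) b0.toList.length :=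
    le_foldl_min _ _ 2 _ (hlen b0 (by simp)) (fun s hs => hlen s (by simp [hs]))
  simp only [cost_params, cost_params_alt]
  set Wn := rest.foldl (fun m s => min m s.toList.length) b0.toList.length with hWn
  set rows := (b0 :: rest).map (fun s => s.toList) ++ [List.replicate b0.toList.length 'x']
    with hrowsdef
  set F : Nat → List Char := fun c => rows.map (fun rr => rr.getD c ' ') with hF
  set g : Nat → Bool × Int × Int × Int :=
    fun c => (F c).foldl colstep (false, (0:Int), (0:Int), (0:Int)) with hg
  have hWb0 : Wn ≤ b0.toList.length := foldl_min_le_init _ _ _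
  have hrowlen : ∀ r' ∈ rows, Wn ≤ r'.length := by
    intro r' hr'
    rw [hrowsdef] at hr'
    rcases List.mem_append.mp hr' with h | h
    · rcases List.mem_map.mp h with ⟨s, hs, rfl⟩
      rcases List.mem_cons.mp hs with rfl | hs
      · exact hWb0
      · exact foldl_min_le_mem _ _ _ _ hs
    · rw [List.mem_singleton.mp h, List.length_replicate]; exact hWb0
  have hrc : rows = b0.toList ::
      (rest.map (fun s => s.toList) ++ [List.replicate b0.toList.length 'x']) := by
    rw [hrowsdef]; simp
  have hzip : pyZipStar rows = (List.range Wn).map F := by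
    rw [hrc]
    apply zip_eq_range_map
    rw [List.foldl_append, List.foldl_map]
    simp only [List.foldl_cons, List.foldl_nil, List.length_replicate]
    exact min_eq_left hWb0
  have hlenF : ∀ c, (F c).length = rows.length := by intro c; simp [hF]
  have hfin1 : (List.foldl (rowStep Wn) (List.replicate Wn ((false : Bool), (0:Int), (0:Int), (0:Int)), (0:Int)) rows).1 =
      (List.range Wn).map g := by
    rw [bfold_fst]
    have hrep : (List.replicate Wn ((false : Bool), (0:Int), (0:Int), (0:Int))).length = Wn :=
      List.length_replicate
    have hL := zfold_length rows (List.replicate Wn (false, 0, 0, 0))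
      (by intro r' hr'; rw [hrep]; exact hrowlen r' hr')
    apply List.ext_getElem (by simp [hL, hrep])
    intro i h1 h2
    have hiW : i < Wn := by rw [hL, hrep] at h1; exact h1
    rw [← List.getD_eq_getElem _ ((false : Bool), (0:Int), (0:Int), (0:Int)) h1,
      zfold_getD rows _ i (by intro r' hr'; rw [hrep]; exact hrowlen r' hr') (by rw [hrep]; exact hiW),
      List.getD_eq_getElem _ _ (by rw [hrep]; exact hiW), List.getElem_replicate]
    simp [hg, hF]
  have hfin2 : (List.foldl (rowStep Wn) (List.replicate Wn ((false : Bool), (0:Int), (0:Int), (0:Int)), (0:Int)) rows).2 =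
      ∑ i ∈ Finset.range rows.length, wrow Wn (rows.getD i []) := by
    rw [bfold_snd Wn rows (by omega) hrowlen, sum_map_eq_range_sum _ _ []]
    ring
  rw [hzip, hfin1, hfin2]
  have hcolx : ∀ c, c < Wn →
      F c = ((b0 :: rest).map (fun s => s.toList)).map (fun rr => rr.getD c ' ') ++ ['x'] := by
    intro c hc
    show rows.map (fun rr => rr.getD c ' ') = _
    rw [hrowsdef, List.map_append]
    congr 1
    simp only [List.map_cons, List.map_nil]
    rw [List.getD_eq_getElem _ _ (by simpa using lt_of_lt_of_le hc hWb0), List.getElem_replicate]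
  have hg2 : ∀ c, (g c).2.1 = (((F c).takeWhile PySem.Chars.isspace).length : Int) := by
    intro c; show ((F c).foldl colstep (false, 0, 0, 0)).2.1 = _
    rw [colstep_false]; simp
  have hgh : ∀ c, (g c).2.2.1 = ((((F c).dropWhile PySem.Chars.isspace).count ' ' : Nat) : Int) := by
    intro c; show ((F c).foldl colstep (false, 0, 0, 0)).2.2.1 = _
    rw [colstep_false]
  have hgx : ∀ c, (g c).2.2.2 = (((F c).count 'x' : Nat) : Int) := by
    intro c; show ((F c).foldl colstep (false, 0, 0, 0)).2.2.2 = _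
    rw [colstep_false]; simp
  have hlstriplen : ∀ c, ((PySem.Chars.lstrip (F c)).length : Int) =
      (rows.length : Int) - (g c).2.1 := by
    intro c
    rw [hg2 c]
    unfold PySem.Chars.lstrip
    rw [length_dropWhile_eq]
    have h1 : ((F c).takeWhile PySem.Chars.isspace).length +
        ((F c).dropWhile PySem.Chars.isspace).length = (F c).length := by
      rw [← List.length_append, List.takeWhile_append_dropWhile]
    rw [hlenF c] at h1 ⊢
    omega
  -- holes
  have c1 : List.foldl (fun a s => a + ((PySem.Chars.count s [' '] : Nat) : Int)) 0
        (List.map PySem.Chars.strip (List.map F (List.range Wn))) =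
      sumHoles (List.map g (List.range Wn)) := by
    rw [PySem.List.foldl_add, sumHoles, PySem.List.foldl_add]
    simp only [List.map_map, zero_add]
    apply congrArg List.sum
    apply List.map_congr_left
    intro c hc
    have hcW := List.mem_range.mp hc
    simp only [Function.comp]
    rw [hgh c, count_singleton, hcolx c hcW, strip_append_x]
    rfl
  -- heights
  obtain ⟨k, hk⟩ : ∃ k, Wn = k + 2 := ⟨Wn - 2, by omega⟩
  have hrme : List.range Wn = 0 :: (List.range (k+1)).map Nat.succ := by
    rw [hk, List.range_succ_eq_map]
  have cmax : pyMaxLen (List.map PySem.Chars.lstrip (List.map F (List.range Wn))) =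
      (rows.length : Int) - minLead (List.map g (List.range Wn)) := by
    rw [hrme]
    simp only [List.map_cons, minLead, pyMaxLen, List.foldl_map]
    rw [hlstriplen 0]
    rw [PySem.List.foldl_congr_mem' (List.range (k+1))
      (fun m c => max m ((PySem.Chars.lstrip (F c.succ)).length : Int))
      (fun m c => max m ((rows.length : Int) - (g c.succ).2.1)) _
      (fun c _ m => by show max m _ = max m _; rw [hlstriplen c.succ])]
    exact fold_max_sub _ _ _ _
  have cmin : pyMinLen (List.map PySem.Chars.lstrip (List.map F (List.range Wn))) =
      (rows.length : Int) - maxLead (List.map g (List.range Wn)) := by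
    rw [hrme]
    simp only [List.map_cons, maxLead, pyMinLen, List.foldl_map]
    rw [hlstriplen 0]
    rw [PySem.List.foldl_congr_mem' (List.range (k+1))
      (fun m c => min m ((PySem.Chars.lstrip (F c.succ)).length : Int))
      (fun m c => min m ((rows.length : Int) - (g c.succ).2.1)) _
      (fun c _ m => by show min m _ = min m _; rw [hlstriplen c.succ])]
    exact fold_min_sub _ _ _ _
  -- empty space
  have cemp : List.foldl (fun a s =>
        a + (pyMaxLen (List.map PySem.Chars.lstrip (List.map F (List.range Wn))) -
          ((PySem.Chars.count s ['x'] : Nat) : Int))) 0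
        (List.map PySem.Chars.lstrip (List.map F (List.range Wn))) =
      (Wn : Int) * ((rows.length : Int) - minLead (List.map g (List.range Wn))) -
        sumXs (List.map g (List.range Wn)) := by
    rw [PySem.List.foldl_add, zero_add, sum_map_const_sub_int, cmax]
    have hL : (List.map PySem.Chars.lstrip (List.map F (List.range Wn))).length = Wn := by simp
    rw [hL, sumXs, PySem.List.foldl_add, zero_add]
    congr 1
    simp only [List.map_map]
    apply congrArg List.sum
    apply List.map_congr_left
    intro c hc
    simp only [Function.comp]
    rw [hgx c, count_singleton, count_x_lstrip]
  -- wells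
  have c4 : wellsOf (List.map F (List.range Wn)) =
      ∑ i ∈ Finset.range rows.length, wrow Wn (rows.getD i []) := by
    have := wellsA_eq rows Wn (by omega)
    simpa [hF] using this
  simp only [Prod.mk.injEq]
  exact ⟨c1, by rw [cmax, cmin], cemp, c4, trivial⟩

-- ===== VERDICT =====
theorem cost_params_spec : Claim_equal_cost_params := by
  intro board hdom hpre
  unfold Spec_cost_params
  obtain ⟨hne, hl⟩ := hpre
  match board with
  | [] => exact absurd rfl hne
  | b0 :: rest => exact main_eq b0 rest hl
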